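-- pv_equiv track=rewrite | github.com/rhkdguskim/Study | 알고리즘/백준/졸려.py | solve
-- ===== SOURCE A (Python) =====
-- from collections import deque
--
-- def solve(char):
--     temp = deque()
--     temp2 = deque()
--     for i in range(len(char)):
--         if i % 2 == 1:
--             temp.appendleft(char[i])
--         else:
--             temp2.append(char[i])
--
--     return list(temp2) + list(temp)
-- ===== SOURCE B (Python) =====
-- def solve(char):
--     even = list(char[0::2])
--     odd = list(char[1::2])
--     return even + odd[::-1]
-- ===== Notes on version B (the rewrite author's own statement) =====
-- stated objective: simpler
-- what changed: Replaces the index loop with its parity branch and two deques by strided slicing: even-index chars via char[0::2], odd-index chars via char[1::2] reversed in one slicing step (loop-free, done in C-level slice operations).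
import Mathlib
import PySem

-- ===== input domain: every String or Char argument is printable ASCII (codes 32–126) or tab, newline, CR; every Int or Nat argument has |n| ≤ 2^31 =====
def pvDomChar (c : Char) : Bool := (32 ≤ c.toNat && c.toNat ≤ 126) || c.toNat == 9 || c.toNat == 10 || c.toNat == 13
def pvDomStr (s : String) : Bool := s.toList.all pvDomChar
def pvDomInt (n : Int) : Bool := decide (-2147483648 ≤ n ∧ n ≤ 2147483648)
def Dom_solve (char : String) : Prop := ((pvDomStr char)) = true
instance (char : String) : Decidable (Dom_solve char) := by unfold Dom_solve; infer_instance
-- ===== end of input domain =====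

-- B replaces A's index loop with its parity branch and two deques by strided slicing (even slice ++ reversed odd slice); simpler, same cost.

-- ===== PORT A =====
-- literal port: for i in range(len(char)): odd i → appendleft to temp, even i → append to temp2; return list(temp2)+list(temp)
def solve (char : String) : List String :=
  let cs := char.toList
  let st := (PySem.List.pyRange 0 (cs.length : Int) 1).foldl
    (fun (st : List Char × List Char) i =>
      if PySem.Int.mod i 2 = 1 then (PySem.List.pyGetD cs i ' ' :: st.1, st.2)
      else (st.1, st.2 ++ [PySem.List.pyGetD cs i ' '])) ([], [])
  (st.2 ++ st.1).map (fun c => String.ofList [c])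

-- ===== PORT B =====
-- literal port of Source B: even = list(char[0::2]); odd = list(char[1::2]); return even + odd[::-1]
def solve_alt (char : String) : List String :=
  let cs := char.toList
  let even := (PySem.List.slice? cs (some 0) none 2).getD []
  let odd := (PySem.List.slice? cs (some 1) none 2).getD []
  (even ++ (PySem.List.slice? odd none none (-1)).getD []).map (fun c => String.ofList [c])

-- ===== PRECONDITION & SPEC =====
def Spec_solve (char : String) (out : List String) : Prop := out = solve_alt char
instance (char : String) (out : List String) : Decidable (Spec_solve char out) := by unfold Spec_solve; infer_instance

-- ===== CLAIM (what is proved, stated in full; the proofs are below) =====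
def Claim_equal_solve : Prop := ∀ (char : String), Dom_solve char → Spec_solve char (solve char)

-- ===== LEMMAS AND PROOFS =====

-- every other element starting with the first
def stride2 {α : Type} : List α → List α
  | [] => []
  | [x] => [x]
  | x :: _ :: t => x :: stride2 t

theorem stride2_cons {α : Type} (c : α) (t : List α) :
    stride2 (c :: t) = c :: stride2 t.tail := by
  cases t <;> simp [stride2]

theorem fm_even {α : Type} (xs : List α) :
    List.filterMap (fun k => xs[2*k]?) (List.range ((xs.length+1)/2)) = stride2 xs := by
  induction xs using stride2.induct with
  | case1 => simp [stride2]
  | case2 x => simp [stride2]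
  | case3 x y t ih =>
    have hlen : ((x :: y :: t).length + 1) / 2 = (t.length + 1) / 2 + 1 := by
      simp; omega
    rw [hlen, List.range_succ_eq_map, List.filterMap_cons, List.filterMap_map]
    have hf : (fun k : Nat => (x :: y :: t)[2*(k+1)]?) = fun k => t[2*k]? := by
      funext k
      rw [show 2*(k+1) = (2*k + 1) + 1 by omega]
      simp
    simp only [Function.comp_def, Nat.succ_eq_add_one]
    rw [hf]
    simp [ih, stride2]

theorem slice_even {α : Type} (xs : List α) :
    PySem.List.slice? xs (some 0) none 2 = some (stride2 xs) := by
  simp only [PySem.List.slice?, PySem.List.sliceIndices]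
  norm_num
  rw [show (if 0 < xs.length then (((xs.length : Int) + 2 - 1) / 2).toNat else 0) = (xs.length + 1) / 2 by split <;> omega]
  rw [show (fun x : Nat => xs[(2 * (x:Int)).toNat]?) = fun x => xs[2*x]? by funext k; rw [show ((2 * (k:Int)).toNat) = 2*k by omega]]
  exact fm_even xs

theorem slice_odd {α : Type} (xs : List α) :
    PySem.List.slice? xs (some 1) none 2 = some (stride2 xs.tail) := by
  cases xs with
  | nil => norm_num [PySem.List.slice?, PySem.List.sliceIndices, stride2]
  | cons a t =>
    simp only [PySem.List.slice?, PySem.List.sliceIndices]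
    norm_num
    rw [show (if 0 < t.length then (((t.length : Int) + 2 - 1) / 2).toNat else 0) = (t.length + 1) / 2 by split <;> omega]
    rw [show (fun x : Nat => (a :: t)[(1 + 2 * (x:Int)).toNat]?) = fun x => t[2*x]? by funext k; rw [show ((1 + 2 * (k:Int)).toNat) = 2*k+1 by omega]; simp]
    exact fm_even t

-- the loop body of A, on (index, element) pairs
def stepA {α : Type} (st : List α × List α) (p : Int × α) : List α × List α :=
  if PySem.Int.mod p.1 2 = 1 then (p.2 :: st.1, st.2) else (st.1, st.2 ++ [p.2])

theorem foldl_enumerate_stepA {α : Type} (cs : List α) :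
    ∀ (s : Int) (acc : List α × List α),
      (PySem.Int.mod s 2 = 0 →
        (PySem.List.enumerate cs s).foldl stepA acc =
          ((stride2 cs.tail).reverse ++ acc.1, acc.2 ++ stride2 cs)) ∧
      (PySem.Int.mod s 2 = 1 →
        (PySem.List.enumerate cs s).foldl stepA acc =
          ((stride2 cs).reverse ++ acc.1, acc.2 ++ stride2 cs.tail)) := by
  induction cs with
  | nil => intro s acc; simp [PySem.List.enumerate, stride2]
  | cons c t ih =>
    intro s acc
    have hm : PySem.Int.mod s 2 = s % 2 := PySem.Int.mod_eq_emod_of_pos (by omega)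
    have hm1 : PySem.Int.mod (s+1) 2 = (s+1) % 2 := PySem.Int.mod_eq_emod_of_pos (by omega)
    constructor
    · intro h0
      rw [hm] at h0
      have h1 : PySem.Int.mod (s+1) 2 = 1 := by rw [hm1]; omega
      rw [PySem.List.enumerate_cons, List.foldl_cons, (ih (s+1) (stepA acc (s, c))).2 h1]
      simp [stepA, h0, stride2_cons]
    · intro h1
      rw [hm] at h1
      have h0 : PySem.Int.mod (s+1) 2 = 0 := by rw [hm1]; omega
      rw [PySem.List.enumerate_cons, List.foldl_cons, (ih (s+1) (stepA acc (s, c))).1 h0]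
      simp [stepA, h1, stride2_cons]

-- ===== VERDICT (by name: the statement is the Claim_ definition above) =====
theorem solve_spec : Claim_equal_solve := by
  intro char _
  unfold Spec_solve solve solve_alt
  set cs := char.toList with hcs
  have e1 : (PySem.List.pyRange 0 (cs.length : Int) 1).foldl
      (fun (st : List Char × List Char) i =>
        if PySem.Int.mod i 2 = 1 then (PySem.List.pyGetD cs i ' ' :: st.1, st.2)
        else (st.1, st.2 ++ [PySem.List.pyGetD cs i ' '])) ([], [])
      = (PySem.List.enumerate cs 0).foldl stepA ([], []) := by
    rw [PySem.List.enumerate_eq_map_pyRange (d := ' '), List.foldl_map]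
    simp [stepA, PySem.List.len]
  have e2 := (foldl_enumerate_stepA cs 0 ([], [])).1
    (by rw [PySem.Int.mod_eq_emod_of_pos (by omega)]; norm_num)
  dsimp only
  rw [e1, e2, slice_even, slice_odd, PySem.List.slice?_none_none_neg_one]
  simp
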